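-- pv_equiv track=rewrite | github.com/byding823-cmd/TeCoR-UAV | mappo/envs/drone_env_new.py | decode_actions
-- ===== SOURCE A (Python) =====
-- def merge_with_separators(lists, separator=0):
--     result = []
--     for i, lst in enumerate(lists):
--         result.extend(lst)
--         if i < len(lists) - 1:
--             result.append(separator)
--     return result
--
-- def decode_actions(actions):
--     # [1, 0, 0, 0, 2, 1, 2, 0, 3, 1]
--     uav1 = []
--     uav2 = []
--     uav3 = []
--     uav4 = []
--     uav5 = []
--     uav6 = []
--     # uav7 = []
--     # uav8 = []
--     for i in range(len(actions)):
--         if actions[i] == 0: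
--             uav1.append(i + 1)
--         elif actions[i] == 1:
--             uav2.append(i + 1)
--         elif actions[i] == 2:
--             uav3.append(i + 1)
--         elif actions[i] == 3:
--             uav4.append(i + 1)
--         elif actions[i] == 4:
--             uav5.append(i + 1)
--         elif actions[i] == 5:
--             uav6.append(i + 1)
--         # elif actions[i] == 6:
--         #     uav7.append(i + 1)
--         # elif actions[i] == 7:
--         #     uav8.append(i + 1)
--         else:
--             pass
--     end_list = [uav1, uav2, uav3, uav4, uav5, uav6]
--     res_list = merge_with_separators(end_list, 0)
--     return res_list
-- ===== SOURCE B (Python) =====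
-- def decode_actions(actions):
--     result = []
--     for v in range(6):
--         result.extend(i + 1 for i, a in enumerate(actions) if a == v)
--         if v < 5:
--             result.append(0)
--     return result
-- ===== Notes on version B (the rewrite author's own statement) =====
-- stated objective: idiomatic
-- what changed: Replaces the six named accumulators with an if/elif chain and the separate merge helper by one loop over the value range 0..5 that builds each group with a comprehension and appends the separator inline.
import Mathlib
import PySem

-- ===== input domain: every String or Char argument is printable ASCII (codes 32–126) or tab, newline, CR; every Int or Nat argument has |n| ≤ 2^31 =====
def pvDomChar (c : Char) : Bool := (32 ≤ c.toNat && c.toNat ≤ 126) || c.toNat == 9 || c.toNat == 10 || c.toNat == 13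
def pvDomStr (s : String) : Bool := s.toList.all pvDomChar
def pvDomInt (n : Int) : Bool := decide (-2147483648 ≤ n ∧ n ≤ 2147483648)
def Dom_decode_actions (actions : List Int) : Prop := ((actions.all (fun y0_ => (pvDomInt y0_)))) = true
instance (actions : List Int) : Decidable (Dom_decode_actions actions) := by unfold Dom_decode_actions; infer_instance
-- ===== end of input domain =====

-- B replaces A's six named accumulators filled by an if/elif chain plus a merge helper
-- with one idiomatic loop over the value range 0..5 (same O(n) cost, six short passes).

-- ===== PORT A =====
-- six-list state for the single bucketing pass
abbrev UAVState := List Int × List Int × List Int × List Int × List Int × List Int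

def stepA (st : UAVState) (p : Int × Int) : UAVState :=
  if p.2 = 0 then (st.1 ++ [p.1 + 1], st.2.1, st.2.2.1, st.2.2.2.1, st.2.2.2.2.1, st.2.2.2.2.2)
  else if p.2 = 1 then (st.1, st.2.1 ++ [p.1 + 1], st.2.2.1, st.2.2.2.1, st.2.2.2.2.1, st.2.2.2.2.2)
  else if p.2 = 2 then (st.1, st.2.1, st.2.2.1 ++ [p.1 + 1], st.2.2.2.1, st.2.2.2.2.1, st.2.2.2.2.2)
  else if p.2 = 3 then (st.1, st.2.1, st.2.2.1, st.2.2.2.1 ++ [p.1 + 1], st.2.2.2.2.1, st.2.2.2.2.2)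
  else if p.2 = 4 then (st.1, st.2.1, st.2.2.1, st.2.2.2.1, st.2.2.2.2.1 ++ [p.1 + 1], st.2.2.2.2.2)
  else if p.2 = 5 then (st.1, st.2.1, st.2.2.1, st.2.2.2.1, st.2.2.2.2.1, st.2.2.2.2.2 ++ [p.1 + 1])
  else st

def merge_with_separators (lists : List (List Int)) (separator : Int) : List Int :=
  (PySem.List.enumerate lists).foldl
    (fun res p =>
      let res := res ++ p.2
      if p.1 < (lists.length : Int) - 1 then res ++ [separator] else res) []

def decode_actions (actions : List Int) : List Int :=
  let st := (PySem.List.enumerate actions).foldl stepA ([], [], [], [], [], [])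
  merge_with_separators [st.1, st.2.1, st.2.2.1, st.2.2.2.1, st.2.2.2.2.1, st.2.2.2.2.2] 0

-- ===== PORT B =====
def decode_actions_alt (actions : List Int) : List Int :=
  (PySem.List.pyRange 0 6 1).foldl
    (fun res v =>
      let res := res ++ (PySem.List.enumerate actions).filterMap
        (fun p => if p.2 = v then some (p.1 + 1) else none)
      if v < 5 then res ++ [0] else res) []

-- ===== PRECONDITION & SPEC =====
def Spec_decode_actions (actions : List Int) (out : List Int) : Prop := out = decode_actions_alt actions
instance (actions : List Int) (out : List Int) : Decidable (Spec_decode_actions actions out) := by unfold Spec_decode_actions; infer_instance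

-- ===== CLAIM (what is proved, stated in full; the proofs are below) =====
def Claim_equal_decode_actions : Prop := ∀ (actions : List Int), Dom_decode_actions actions → Spec_decode_actions actions (decode_actions actions)

-- ===== LEMMAS AND PROOFS =====

-- group of value v, starting enumeration at s
def grp (xs : List Int) (s : Int) (v : Int) : List Int :=
  (PySem.List.enumerate xs s).filterMap (fun p => if p.2 = v then some (p.1 + 1) else none)

theorem grp_nil (s v : Int) : grp [] s v = [] := rfl

theorem grp_cons (x : Int) (xs : List Int) (s v : Int) :
    grp (x :: xs) s v = (if x = v then [s + 1] else []) ++ grp xs (s + 1) v := by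
  simp only [grp, PySem.List.enumerate_cons, List.filterMap_cons]
  split_ifs <;> simp

theorem bucket (xs : List Int) (s : Int) (a1 a2 a3 a4 a5 a6 : List Int) :
    (PySem.List.enumerate xs s).foldl stepA (a1, a2, a3, a4, a5, a6) =
      (a1 ++ grp xs s 0, a2 ++ grp xs s 1, a3 ++ grp xs s 2,
       a4 ++ grp xs s 3, a5 ++ grp xs s 4, a6 ++ grp xs s 5) := by
  induction xs generalizing s a1 a2 a3 a4 a5 a6 with
  | nil => simp [grp_nil, PySem.List.enumerate_nil]
  | cons x xs ih =>
    rw [PySem.List.enumerate_cons, List.foldl_cons]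
    simp only [grp_cons]
    by_cases h0 : x = 0 <;> by_cases h1 : x = 1 <;> by_cases h2 : x = 2 <;>
      by_cases h3 : x = 3 <;> by_cases h4 : x = 4 <;> by_cases h5 : x = 5 <;>
      simp_all [stepA]

-- ===== VERDICT (by name: the statement is the Claim_ definition above) =====
theorem decode_actions_spec : Claim_equal_decode_actions := by
  intro actions _
  unfold Spec_decode_actions decode_actions decode_actions_alt merge_with_separators
  rw [bucket]
  have hr : PySem.List.pyRange 0 6 1 = [0, 1, 2, 3, 4, 5] := by decide
  rw [hr]
  simp [PySem.List.enumerate, grp]
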